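-- pv_equiv track=rewrite | github.com/dgleich/mathjax-fonts | lib/mathjax_font_lib.py | _build_require_block
-- ===== SOURCE A (Python) =====
-- def _build_require_block(subdir):
--     """Build the require() statements for all variant files."""
--     lines = []
--     lines.append(f'var normal_js_1 = require("./{subdir}/normal.js");')
--     lines.append(f'var bold_js_1 = require("./{subdir}/bold.js");')
--     lines.append(f'var italic_js_1 = require("./{subdir}/italic.js");')
--     lines.append(f'var bold_italic_js_1 = require("./{subdir}/bold-italic.js");')
--     lines.append(f'var monospace_js_1 = require("./{subdir}/monospace.js");')
--     lines.append(f'var smallop_js_1 = require("./{subdir}/smallop.js");')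
--     lines.append(f'var largeop_js_1 = require("./{subdir}/largeop.js");')
--     for sz in range(3, 16):
--         lines.append(f'var size{sz}_js_1 = require("./{subdir}/size{sz}.js");')
--     lines.append(f'var lf_tp_js_1 = require("./{subdir}/lf-tp.js");')
--     lines.append(f'var rt_bt_js_1 = require("./{subdir}/rt-bt.js");')
--     lines.append(f'var ext_js_1 = require("./{subdir}/ext.js");')
--     lines.append(f'var mid_js_1 = require("./{subdir}/mid.js");')
--     lines.append(f'var up_js_1 = require("./{subdir}/up.js");')
--     lines.append(f'var dup_js_1 = require("./{subdir}/dup.js");')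
--     lines.append(f'var delimiters_js_1 = require("./{subdir}/delimiters.js");')
--     return '\n'.join(lines)
-- ===== SOURCE B (Python) =====
-- def _build_require_block(subdir):
--     """Build the require() statements for all variant files."""
--     names = (['normal', 'bold', 'italic', 'bold-italic', 'monospace', 'smallop', 'largeop']
--              + [f'size{sz}' for sz in range(3, 16)]
--              + ['lf-tp', 'rt-bt', 'ext', 'mid', 'up', 'dup', 'delimiters'])
--     return '\n'.join(
--         f'var {name.replace("-", "_")}_js_1 = require("./{subdir}/{name}.js");'
--         for name in names)
-- ===== Notes on version B (the rewrite author's own statement) =====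
-- stated objective: simpler
-- what changed: Replaced 20+ literal append statements plus an embedded numeric loop by one ordered data table of base filenames and a single uniform pass that derives each variable name by a hyphen-to-underscore replacement and joins the lines.
import Mathlib
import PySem

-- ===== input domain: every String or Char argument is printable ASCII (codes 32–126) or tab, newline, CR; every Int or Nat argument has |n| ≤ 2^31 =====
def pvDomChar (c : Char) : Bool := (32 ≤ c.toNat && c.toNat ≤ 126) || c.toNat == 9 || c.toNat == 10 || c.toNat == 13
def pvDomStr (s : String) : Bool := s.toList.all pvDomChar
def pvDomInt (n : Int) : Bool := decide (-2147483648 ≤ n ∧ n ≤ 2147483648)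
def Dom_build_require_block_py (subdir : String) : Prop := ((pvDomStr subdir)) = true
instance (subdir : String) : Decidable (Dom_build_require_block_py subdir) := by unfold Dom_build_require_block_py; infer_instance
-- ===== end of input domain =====

-- B replaces A's 20+ literal appends plus an embedded numeric loop by one ordered
-- table of base filenames and a single uniform pass (name.replace("-","_")); simpler, same cost.

-- ===== PORT A =====
-- literal transliteration of A: one append per line, a fold for the size loop, '\n'.join
def build_require_block_py (subdir : String) : String :=
  let lines : List String := []
  let lines := lines ++ ["var normal_js_1 = require(\"./" ++ subdir ++ "/normal.js\");"]
  let lines := lines ++ ["var bold_js_1 = require(\"./" ++ subdir ++ "/bold.js\");"]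
  let lines := lines ++ ["var italic_js_1 = require(\"./" ++ subdir ++ "/italic.js\");"]
  let lines := lines ++ ["var bold_italic_js_1 = require(\"./" ++ subdir ++ "/bold-italic.js\");"]
  let lines := lines ++ ["var monospace_js_1 = require(\"./" ++ subdir ++ "/monospace.js\");"]
  let lines := lines ++ ["var smallop_js_1 = require(\"./" ++ subdir ++ "/smallop.js\");"]
  let lines := lines ++ ["var largeop_js_1 = require(\"./" ++ subdir ++ "/largeop.js\");"]
  let lines := PySem.List.pyRange 3 16 1 |>.foldl (fun lines sz =>
    lines ++ ["var size" ++ PySem.Int.toStr sz ++ "_js_1 = require(\"./" ++ subdir ++ "/size" ++ PySem.Int.toStr sz ++ ".js\");"]) lines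
  let lines := lines ++ ["var lf_tp_js_1 = require(\"./" ++ subdir ++ "/lf-tp.js\");"]
  let lines := lines ++ ["var rt_bt_js_1 = require(\"./" ++ subdir ++ "/rt-bt.js\");"]
  let lines := lines ++ ["var ext_js_1 = require(\"./" ++ subdir ++ "/ext.js\");"]
  let lines := lines ++ ["var mid_js_1 = require(\"./" ++ subdir ++ "/mid.js\");"]
  let lines := lines ++ ["var up_js_1 = require(\"./" ++ subdir ++ "/up.js\");"]
  let lines := lines ++ ["var dup_js_1 = require(\"./" ++ subdir ++ "/dup.js\");"]
  let lines := lines ++ ["var delimiters_js_1 = require(\"./" ++ subdir ++ "/delimiters.js\");"]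
  PySem.Str.join "\n" lines

-- ===== PORT B =====
-- literal transliteration of B: one ordered name table, one uniform pass with hyphen-to-underscore replacement
def build_require_block_py_alt (subdir : String) : String :=
  let names : List String :=
    ["normal", "bold", "italic", "bold-italic", "monospace", "smallop", "largeop"]
    ++ (PySem.List.pyRange 3 16 1).map (fun sz => "size" ++ PySem.Int.toStr sz)
    ++ ["lf-tp", "rt-bt", "ext", "mid", "up", "dup", "delimiters"]
  PySem.Str.join "\n" (names.map (fun name =>
    "var " ++ PySem.Str.replace name "-" "_" ++ "_js_1 = require(\"./" ++ subdir ++ "/" ++ name ++ ".js\");"))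

-- ===== PRECONDITION & SPEC =====
def Spec_build_require_block_py (subdir : String) (out : String) : Prop := out = build_require_block_py_alt subdir
instance (subdir : String) (out : String) : Decidable (Spec_build_require_block_py subdir out) := by unfold Spec_build_require_block_py; infer_instance

-- ===== CLAIM (what is proved, stated in full; the proofs are below) =====
def Claim_equal_build_require_block_py : Prop := ∀ (subdir : String), Dom_build_require_block_py subdir → Spec_build_require_block_py subdir (build_require_block_py subdir)

-- ===== LEMMAS AND PROOFS =====
-- evaluation of the hyphen-to-underscore replacement on each of B's 27 literal base names
theorem pvRep0 : PySem.Chars.replace ['n','o','r','m','a','l'] ['-'] ['_'] = ['n','o','r','m','a','l'] := by decide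
theorem pvRep1 : PySem.Chars.replace ['b','o','l','d'] ['-'] ['_'] = ['b','o','l','d'] := by decide
theorem pvRep2 : PySem.Chars.replace ['i','t','a','l','i','c'] ['-'] ['_'] = ['i','t','a','l','i','c'] := by decide
theorem pvRep3 : PySem.Chars.replace ['b','o','l','d','-','i','t','a','l','i','c'] ['-'] ['_'] = ['b','o','l','d','_','i','t','a','l','i','c'] := by decide
theorem pvRep4 : PySem.Chars.replace ['m','o','n','o','s','p','a','c','e'] ['-'] ['_'] = ['m','o','n','o','s','p','a','c','e'] := by decide
theorem pvRep5 : PySem.Chars.replace ['s','m','a','l','l','o','p'] ['-'] ['_'] = ['s','m','a','l','l','o','p'] := by decide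
theorem pvRep6 : PySem.Chars.replace ['l','a','r','g','e','o','p'] ['-'] ['_'] = ['l','a','r','g','e','o','p'] := by decide
theorem pvRep7 : PySem.Chars.replace ['s','i','z','e','3'] ['-'] ['_'] = ['s','i','z','e','3'] := by decide
theorem pvRep8 : PySem.Chars.replace ['s','i','z','e','4'] ['-'] ['_'] = ['s','i','z','e','4'] := by decide
theorem pvRep9 : PySem.Chars.replace ['s','i','z','e','5'] ['-'] ['_'] = ['s','i','z','e','5'] := by decide
theorem pvRep10 : PySem.Chars.replace ['s','i','z','e','6'] ['-'] ['_'] = ['s','i','z','e','6'] := by decide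
theorem pvRep11 : PySem.Chars.replace ['s','i','z','e','7'] ['-'] ['_'] = ['s','i','z','e','7'] := by decide
theorem pvRep12 : PySem.Chars.replace ['s','i','z','e','8'] ['-'] ['_'] = ['s','i','z','e','8'] := by decide
theorem pvRep13 : PySem.Chars.replace ['s','i','z','e','9'] ['-'] ['_'] = ['s','i','z','e','9'] := by decide
theorem pvRep14 : PySem.Chars.replace ['s','i','z','e','1','0'] ['-'] ['_'] = ['s','i','z','e','1','0'] := by decide
theorem pvRep15 : PySem.Chars.replace ['s','i','z','e','1','1'] ['-'] ['_'] = ['s','i','z','e','1','1'] := by decide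
theorem pvRep16 : PySem.Chars.replace ['s','i','z','e','1','2'] ['-'] ['_'] = ['s','i','z','e','1','2'] := by decide
theorem pvRep17 : PySem.Chars.replace ['s','i','z','e','1','3'] ['-'] ['_'] = ['s','i','z','e','1','3'] := by decide
theorem pvRep18 : PySem.Chars.replace ['s','i','z','e','1','4'] ['-'] ['_'] = ['s','i','z','e','1','4'] := by decide
theorem pvRep19 : PySem.Chars.replace ['s','i','z','e','1','5'] ['-'] ['_'] = ['s','i','z','e','1','5'] := by decide
theorem pvRep20 : PySem.Chars.replace ['l','f','-','t','p'] ['-'] ['_'] = ['l','f','_','t','p'] := by decide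
theorem pvRep21 : PySem.Chars.replace ['r','t','-','b','t'] ['-'] ['_'] = ['r','t','_','b','t'] := by decide
theorem pvRep22 : PySem.Chars.replace ['e','x','t'] ['-'] ['_'] = ['e','x','t'] := by decide
theorem pvRep23 : PySem.Chars.replace ['m','i','d'] ['-'] ['_'] = ['m','i','d'] := by decide
theorem pvRep24 : PySem.Chars.replace ['u','p'] ['-'] ['_'] = ['u','p'] := by decide
theorem pvRep25 : PySem.Chars.replace ['d','u','p'] ['-'] ['_'] = ['d','u','p'] := by decide
theorem pvRep26 : PySem.Chars.replace ['d','e','l','i','m','i','t','e','r','s'] ['-'] ['_'] = ['d','e','l','i','m','i','t','e','r','s'] := by decide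

-- ===== VERDICT (by name: the statement is the Claim_ definition above) =====
set_option maxRecDepth 10000 in
theorem build_require_block_py_spec : Claim_equal_build_require_block_py := by
  intro subdir _
  unfold Spec_build_require_block_py
  simp [build_require_block_py, build_require_block_py_alt, PySem.List.pyRange,
    PySem.Int.toStr, PySem.Int.toChars, PySem.Str.replace, PySem.Str.join,
    List.range_succ, Nat.toDigits, Nat.toDigitsCore, PySem.Chars.join, Nat.digitChar,
    pvRep0, pvRep1, pvRep2, pvRep3, pvRep4, pvRep5, pvRep6, pvRep7, pvRep8, pvRep9, pvRep10, pvRep11, pvRep12, pvRep13, pvRep14, pvRep15, pvRep16, pvRep17, pvRep18, pvRep19, pvRep20, pvRep21, pvRep22, pvRep23, pvRep24, pvRep25, pvRep26]
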